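-- pv_equiv track=rewrite | github.com/mist-medical/MIST | mist/models/mgnets/mist_mgnets.py | _generate_sparse_w_sequence
-- ===== SOURCE A (Python) =====
-- from typing import List, Sequence, Dict, Optional, Union, Any
--
-- def _generate_sparse_w_sequence(max_height: int) -> List[int]:
--     """
--     Generates the recursive V-cycle pattern for W-Net topology.
--
--     The sequence is constructed by creating a full pyramid up to max_height
--     and interleaving it with height-1 spikes to maintain high-frequency
--     gradients (e.g., [1, 2, 1, 3, 1...]).
--
--     Args:
--         max_height: The maximum height (depth from bottleneck) the W-Net
--             should reach.
--
--     Returns: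
--         A sequence of integers representing the height of each intermediate
--         spike.
--     """
--     if max_height <= 1:
--         return [1]
--
--     core_sequence = list(range(2, max_height + 1)) + \
--         list(range(max_height - 1, 1, -1))
--     full_sequence = [1]
--     for val in core_sequence:
--         full_sequence.extend([val, 1])
--     return full_sequence
-- ===== SOURCE B (Python) =====
-- def _generate_sparse_w_sequence(max_height):
--     if max_height <= 1:
--         return [1]
--     # Build only the ascending half [1, 2, 1, 3, ..., 1, max_height]
--     asc = []
--     for v in range(2, max_height + 1):
--         asc += [1, v]
--     # Mirror everything before the peak to form the descending half.
--     return asc + asc[:-1][::-1]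
-- ===== Notes on version B (the rewrite author's own statement) =====
-- stated objective: alternative
-- what changed: B builds only the ascending half [1,2,1,...,max_height] in one loop and mirrors its prefix (asc + asc[:-1][::-1]) to get the palindrome, instead of A's precomputed up-and-down core list with 1s interleaved over all of it.
import Mathlib
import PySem

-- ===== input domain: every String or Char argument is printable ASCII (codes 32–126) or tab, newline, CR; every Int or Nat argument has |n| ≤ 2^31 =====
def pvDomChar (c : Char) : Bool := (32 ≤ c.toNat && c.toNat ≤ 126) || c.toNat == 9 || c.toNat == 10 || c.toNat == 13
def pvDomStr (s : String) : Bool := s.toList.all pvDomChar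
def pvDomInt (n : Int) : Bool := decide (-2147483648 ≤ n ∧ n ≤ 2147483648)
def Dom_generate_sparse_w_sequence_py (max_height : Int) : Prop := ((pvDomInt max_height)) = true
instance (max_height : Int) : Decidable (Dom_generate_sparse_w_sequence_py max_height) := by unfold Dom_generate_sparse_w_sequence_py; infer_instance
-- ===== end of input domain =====

-- B builds only the ascending half and mirrors its prefix instead of A's
-- interleaving of 1s over a precomputed up-and-down core list (alternative decomposition, same cost).


-- ===== PORT A =====
def generate_sparse_w_sequence_py (max_height : Int) : List Int :=
  if max_height ≤ 1 then [1]
  else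
    let core_sequence :=
      PySem.List.pyRange 2 (max_height + 1) 1 ++ PySem.List.pyRange (max_height - 1) 1 (-1)
    core_sequence.foldl (fun full_sequence val => full_sequence ++ [val, 1]) [1]

-- ===== PORT B =====
-- asc[:-1] is PySem.List.slice asc none (some (-1)); the [::-1] step is List.reverse (exact).
def generate_sparse_w_sequence_py_alt (max_height : Int) : List Int :=
  if max_height ≤ 1 then [1]
  else
    let asc := (PySem.List.pyRange 2 (max_height + 1) 1).foldl (fun acc v => acc ++ [1, v]) []
    asc ++ (PySem.List.slice asc none (some (-1))).reverse

-- ===== PRECONDITION & SPEC =====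
def Spec_generate_sparse_w_sequence_py (max_height : Int) (out : List Int) : Prop := out = generate_sparse_w_sequence_py_alt max_height
instance (max_height : Int) (out : List Int) : Decidable (Spec_generate_sparse_w_sequence_py max_height out) := by unfold Spec_generate_sparse_w_sequence_py; infer_instance

-- ===== CLAIM (what is proved, stated in full; the proofs are below) =====
def Claim_equal_generate_sparse_w_sequence_py : Prop := ∀ (max_height : Int), Dom_generate_sparse_w_sequence_py max_height → Spec_generate_sparse_w_sequence_py max_height (generate_sparse_w_sequence_py max_height)

-- ===== LEMMAS AND PROOFS =====

-- foldl with a two-element append is init ++ flatMap.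
theorem pv_foldl_two (L : List Int) (init : List Int) (x y : Int → Int) :
    L.foldl (fun acc v => acc ++ [x v, y v]) init
      = init ++ L.flatMap (fun v => [x v, y v]) := by
  induction L generalizing init with
  | nil => simp
  | cons a L ih => simp [ih, List.flatMap_cons]

-- prefixing a 1 to the (v,1)-flattening gives the (1,v)-flattening followed by 1
theorem pv_one_cons (L : List Int) :
    (1 : Int) :: L.flatMap (fun v => [v, 1])
      = L.flatMap (fun v => [1, v]) ++ [1] := by
  induction L with
  | nil => rfl
  | cons a L ih => simp [List.flatMap_cons, ih]

-- reversing the (1,v)-flattening is the (v,1)-flattening of the reverse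
theorem pv_rev_flat (L : List Int) :
    (L.flatMap (fun v => [(1:Int), v])).reverse
      = L.reverse.flatMap (fun v => [v, 1]) := by
  induction L with
  | nil => rfl
  | cons a L ih => simp [List.flatMap_cons, ih]

-- ===== VERDICT (by name: the statement is the Claim_ definition above) =====
theorem generate_sparse_w_sequence_py_spec : Claim_equal_generate_sparse_w_sequence_py := by
  intro m _
  unfold Spec_generate_sparse_w_sequence_py
  unfold generate_sparse_w_sequence_py generate_sparse_w_sequence_py_alt
  by_cases h : m ≤ 1
  · simp [h]
  · simp only [h, if_false]
    have h2 : (2 : Int) ≤ m := by omega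
    -- split the ascending range at its last element
    have hup : PySem.List.pyRange 2 (m + 1) 1 = PySem.List.pyRange 2 m 1 ++ [m] :=
      PySem.List.pyRange_one_succ_right h2
    -- the descending range is the reverse of the ascending interior
    have hdown : PySem.List.pyRange (m - 1) 1 (-1) = (PySem.List.pyRange 2 m 1).reverse := by
      rw [PySem.List.pyRange_neg_one_eq_reverse]
      norm_num
    set U := PySem.List.pyRange 2 m 1 with hU
    rw [hup, hdown, pv_foldl_two, pv_foldl_two, PySem.List.slice_to_neg_one]
    simp only [List.flatMap_append, List.flatMap_cons, List.flatMap_nil, List.append_nil]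
    rw [List.singleton_append]
    have hdl : (U.flatMap (fun v => [(1:Int), v]) ++ [1, m]).dropLast
        = U.flatMap (fun v => [(1:Int), v]) ++ [1] := by
      rw [show ([1, m] : List Int) = [1] ++ [m] by rfl, ← List.append_assoc,
        List.dropLast_concat]
    simp only [List.nil_append]
    rw [hdl, List.reverse_append, pv_rev_flat]
    have key : ∀ (rest : List Int),
        (1 : Int) :: (U.flatMap (fun v => [v, 1]) ++ rest)
          = U.flatMap (fun v => [1, v]) ++ ([1] ++ rest) := by
      intro rest
      rw [← List.cons_append, pv_one_cons, List.append_assoc]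
    simp only [List.append_assoc, key]
    simp
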